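-- pv_equiv track=rewrite | github.com/JoshuaMarden/tube_game | utilities.py | get_adjacent_stations
-- ===== SOURCE A (Python) =====
-- def get_adjacent_stations(station, all_routes):
--
--   adj_stations = set()
--
--   for route in all_routes:
--     if station in route:
--       for index, stop in enumerate(route):
--         if stop == station:
--
--           if index > 0:
--             adj_stations.add(route[index - 1])
--           if index < len(route) - 1:
--             adj_stations.add(route[index + 1])
--
--   return adj_stations
-- ===== SOURCE B (Python) =====
-- def get_adjacent_stations(station, all_routes):
--     adjacency = {}
--     for route in all_routes:
--         for a, b in zip(route, route[1:]):
--             adjacency.setdefault(a, set()).add(b)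
--             adjacency.setdefault(b, set()).add(a)
--     return adjacency.get(station, set())
-- ===== Notes on version B (the rewrite author's own statement) =====
-- stated objective: alternative
-- what changed: Instead of scanning only routes containing the station with enumerate and index arithmetic, B builds a complete adjacency dictionary (station -> neighbour set) from every consecutive pair of every route and then simply looks the queried station up.
import Mathlib
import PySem

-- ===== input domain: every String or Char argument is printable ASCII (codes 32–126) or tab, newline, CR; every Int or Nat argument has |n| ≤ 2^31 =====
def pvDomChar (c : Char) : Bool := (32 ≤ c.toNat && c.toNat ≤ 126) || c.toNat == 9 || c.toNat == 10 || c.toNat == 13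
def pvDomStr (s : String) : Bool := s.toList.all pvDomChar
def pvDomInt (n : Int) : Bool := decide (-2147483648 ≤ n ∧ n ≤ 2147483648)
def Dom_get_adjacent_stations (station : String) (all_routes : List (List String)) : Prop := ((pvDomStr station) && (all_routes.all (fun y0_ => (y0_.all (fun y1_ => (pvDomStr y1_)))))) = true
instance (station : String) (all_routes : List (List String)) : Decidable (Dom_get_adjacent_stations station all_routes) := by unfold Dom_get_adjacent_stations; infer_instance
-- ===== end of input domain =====

-- B builds a complete adjacency graph (dict station -> neighbour set) from all consecutive
-- pairs of all routes, then just looks the queried station up; objective: alternative.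
-- Return value is a Python set.

-- ===== PORT A =====
-- inner-loop body of A: for (index, stop) with stop == station, add route[index-1] / route[index+1]
-- (the pyGetD default "" is unreachable: the guards index > 0 and index < len-1 keep both indices in range)
def stepA (station : String) (route : List String) (s : PySem.Set String) (p : Int × String) : PySem.Set String :=
  if p.2 == station then
    let s := if p.1 > 0 then PySem.Set.add s (PySem.List.pyGetD route (p.1 - 1) "") else s
    if p.1 < (route.length : Int) - 1 then PySem.Set.add s (PySem.List.pyGetD route (p.1 + 1) "") else s
  else s

def get_adjacent_stations (station : String) (all_routes : List (List String)) : List String :=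
  all_routes.foldl (fun adj route =>
    if route.contains station then
      (PySem.List.enumerate route 0).foldl (stepA station route) adj
    else adj) PySem.Set.empty

-- ===== PORT B =====
-- loop body of B: for each edge (a, b) record b as a neighbour of a and a as a neighbour of b.
-- Python's `adjacency.setdefault(k, set()).add(v)` (insert-if-absent then mutate the set) is
-- exactly `d.modify k empty (Set.add · v)`: d[k] = d.get(k, set()) ∪ {v}, same key position.
def stepG (d : PySem.Dict String (PySem.Set String)) (p : String × String) : PySem.Dict String (PySem.Set String) :=
  let d := PySem.Dict.modify d p.1 PySem.Set.empty (fun s => PySem.Set.add s p.2)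
  PySem.Dict.modify d p.2 PySem.Set.empty (fun s => PySem.Set.add s p.1)

def get_adjacent_stations_alt (station : String) (all_routes : List (List String)) : List String :=
  let adjacency := all_routes.foldl (fun d route =>
    (route.zip (PySem.List.slice route (some 1) none)).foldl stepG d) PySem.Dict.empty
  PySem.Dict.getD adjacency station PySem.Set.empty

-- ===== PRECONDITION & SPEC =====
def Spec_get_adjacent_stations (station : String) (all_routes : List (List String)) (out : List String) : Prop := out = get_adjacent_stations_alt station all_routes
instance (station : String) (all_routes : List (List String)) (out : List String) : Decidable (Spec_get_adjacent_stations station all_routes out) := by unfold Spec_get_adjacent_stations; infer_instance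

-- ===== CLAIM (what is proved, stated in full; the proofs are below) =====
def Claim_equal_get_adjacent_stations : Prop := ∀ (station : String) (all_routes : List (List String)), Dom_get_adjacent_stations station all_routes → Spec_get_adjacent_stations station all_routes (get_adjacent_stations station all_routes)

-- ===== LEMMAS AND PROOFS =====

-- projection of one graph step onto the station's neighbour set
def stepB (station : String) (s : PySem.Set String) (p : String × String) : PySem.Set String :=
  let s := if p.1 == station then PySem.Set.add s p.2 else s
  if p.2 == station then PySem.Set.add s p.1 else s

lemma getD_stepG (st : String) (d : PySem.Dict String (PySem.Set String)) (p : String × String) :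
    PySem.Dict.getD (stepG d p) st PySem.Set.empty
      = stepB st (PySem.Dict.getD d st PySem.Set.empty) p := by
  obtain ⟨a, b⟩ := p
  by_cases h1 : a = st
  · subst h1
    by_cases h2 : b = a
    · subst h2; simp [stepG, stepB]
    · simp [stepG, stepB, PySem.Dict.getD_modify, h2, Ne.symm h2]
  · by_cases h2 : b = st
    · subst h2; simp [stepG, stepB, PySem.Dict.getD_modify, h1, Ne.symm h1]
    · simp [stepG, stepB, PySem.Dict.getD_modify, h1, h2, Ne.symm h1, Ne.symm h2]

lemma getD_foldl_stepG (st : String) :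
    ∀ (pairs : List (String × String)) (d : PySem.Dict String (PySem.Set String)),
      PySem.Dict.getD (pairs.foldl stepG d) st PySem.Set.empty
        = pairs.foldl (stepB st) (PySem.Dict.getD d st PySem.Set.empty) := by
  intro pairs
  induction pairs with
  | nil => intro d; rfl
  | cons p ps ih =>
    intro d
    simp only [List.foldl_cons, ih, getD_stepG]

-- common recursive shape: walk the route remembering the previous stop
def trifold (st : String) : Option String → List String → PySem.Set String → PySem.Set String
  | _, [], s => s
  | prev, x :: xs, s =>
      let s' :=
        if x == st then
          let s1 := match prev with | some p => PySem.Set.add s p | none => s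
          match xs.head? with | some n => PySem.Set.add s1 n | none => s1
        else s
      trifold st (some x) xs s'

def Binner (st : String) (l : List String) (s : PySem.Set String) : PySem.Set String :=
  (l.zip (l.drop 1)).foldl (stepB st) s

lemma Binner_cons_cons (st x y : String) (ys : List String) (s : PySem.Set String) :
    Binner st (x :: y :: ys) s = Binner st (y :: ys) (stepB st s (x, y)) := by
  simp [Binner, List.zip]

lemma trifold_some_eq_Binner (st : String) :
    ∀ (l : List String) (p : String) (s : PySem.Set String),
      trifold st (some p) l s
        = Binner st l (match l.head? with
                       | some x => if x == st then PySem.Set.add s p else s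
                       | none => s) := by
  intro l
  induction l with
  | nil => intro p s; simp [trifold, Binner]
  | cons x xs ih =>
    intro p s
    cases xs with
    | nil => by_cases hx : x == st <;> simp [trifold, Binner, hx]
    | cons y ys =>
      have h1 : trifold st (some p) (x :: y :: ys) s
          = trifold st (some x) (y :: ys)
              (if x == st then PySem.Set.add (PySem.Set.add s p) y else s) := rfl
      rw [h1, ih x, Binner_cons_cons]
      by_cases hx : x == st <;> by_cases hy : y == st <;>
        simp [stepB, hx, hy]

lemma trifold_none_eq_Binner (st : String) (l : List String) (s : PySem.Set String) :
    trifold st none l s = Binner st l s := by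
  cases l with
  | nil => simp [trifold, Binner]
  | cons x xs =>
    cases xs with
    | nil => by_cases hx : x == st <;> simp [trifold, Binner, hx]
    | cons y ys =>
      have h1 : trifold st none (x :: y :: ys) s
          = trifold st (some x) (y :: ys)
              (if x == st then PySem.Set.add s y else s) := rfl
      rw [h1, trifold_some_eq_Binner, Binner_cons_cons]
      by_cases hx : x == st <;> by_cases hy : y == st <;>
        simp [stepB, hx, hy]

lemma trifold_not_mem (st : String) :
    ∀ (l : List String) (prev : Option String) (s : PySem.Set String),
      st ∉ l → trifold st prev l s = s := by
  intro l
  induction l with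
  | nil => intro prev s _; rfl
  | cons x xs ih =>
    intro prev s h
    have hx : ¬ (x == st) := by
      simp only [beq_iff_eq]
      intro hc; exact h (hc ▸ List.mem_cons_self)
    simp only [trifold, hx]
    exact ih (some x) s (fun hm => h (List.mem_cons_of_mem _ hm))

lemma enumerate_foldl_stepA (st : String) :
    ∀ (rest pre : List String) (s : PySem.Set String),
      (PySem.List.enumerate rest (pre.length : Int)).foldl (stepA st (pre ++ rest)) s
        = trifold st pre.getLast? rest s := by
  intro rest
  induction rest with
  | nil => intro pre s; simp [PySem.List.enumerate_nil, trifold]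
  | cons x xs ih =>
    intro pre s
    rw [PySem.List.enumerate_cons, List.foldl_cons]
    have hstep : stepA st (pre ++ x :: xs) s ((pre.length : Int), x)
        = (if x == st then
            let s1 := match pre.getLast? with | some p => PySem.Set.add s p | none => s
            match xs.head? with | some n => PySem.Set.add s1 n | none => s1
          else s) := by
      by_cases hx : x == st
      · simp only [stepA, hx, if_true]
        have hprev : (if ((pre.length : Int)) > 0 then
              PySem.Set.add s (PySem.List.pyGetD (pre ++ x :: xs) ((pre.length : Int) - 1) "")
            else s)
            = (match pre.getLast? with | some p => PySem.Set.add s p | none => s) := by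
          cases pre with
          | nil => simp
          | cons q qs =>
            rw [if_pos (by exact_mod_cast Nat.succ_pos qs.length)]
            rw [PySem.List.pyGetD_eq_getElem _ _
              (by simp only [List.length_cons]; push_cast; omega)
              (by simp only [List.length_append, List.length_cons]; push_cast; omega)]
            have ht : (((q :: qs).length : Int) - 1).toNat = (q :: qs).length - 1 := by
              simp
            have hlast : (q :: qs).getLast? = some ((q :: qs).getLast (by simp)) :=
              List.getLast?_eq_some_getLast _
            rw [hlast]
            congr 1
            simp only [ht]
            rw [List.getLast_eq_getElem]
            exact List.getElem_append_left (by simp)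
        rw [hprev]
        set s1 := (match pre.getLast? with | some p => PySem.Set.add s p | none => s) with hs1
        cases xs with
        | nil =>
          rw [if_neg (by simp)]
          rfl
        | cons y ys =>
          rw [if_pos (by simp only [List.length_append, List.length_cons]; push_cast; omega)]
          rw [PySem.List.pyGetD_eq_getElem _ _
            (by positivity)
            (by simp only [List.length_append, List.length_cons]; push_cast; omega)]
          have ht : ((pre.length : Int) + 1).toNat = pre.length + 1 := by omega
          simp only [List.head?_cons]
          congr 1
          simp only [ht]
          rw [List.getElem_append_right (by omega)]
          simp
      · simp [stepA, hx]
    rw [hstep]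
    have hfull : pre ++ x :: xs = (pre ++ [x]) ++ xs := by simp
    rw [hfull]
    have hih := ih (pre ++ [x])
    have hlen : (((pre ++ [x]).length : Int)) = (pre.length : Int) + 1 := by simp
    rw [hlen] at hih
    rw [hih]
    have : trifold st pre.getLast? (x :: xs) s
        = trifold st (some x) xs
            (if x == st then
              let s1 := match pre.getLast? with | some p => PySem.Set.add s p | none => s
              match xs.head? with | some n => PySem.Set.add s1 n | none => s1
            else s) := rfl
    rw [this]
    congr 1
    simp

lemma inner_eq (st : String) (route : List String) (s : PySem.Set String) :
    (if route.contains st then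
        (PySem.List.enumerate route 0).foldl (stepA st route) s
      else s)
      = Binner st route s := by
  by_cases h : route.contains st
  · rw [if_pos h]
    have := enumerate_foldl_stepA st route [] s
    simpa [trifold_none_eq_Binner] using this
  · rw [if_neg h]
    have hnm : st ∉ route := by
      simpa using h
    rw [← trifold_none_eq_Binner, trifold_not_mem st route none s hnm]

lemma foldl_routes_eq (st : String) :
    ∀ (routes : List (List String)) (s : PySem.Set String) (d : PySem.Dict String (PySem.Set String)),
      PySem.Dict.getD d st PySem.Set.empty = s →
      routes.foldl (fun adj route =>
          if route.contains st then
            (PySem.List.enumerate route 0).foldl (stepA st route) adj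
          else adj) s
        = PySem.Dict.getD
            (routes.foldl (fun d route =>
              (route.zip (PySem.List.slice route (some 1) none)).foldl stepG d) d)
            st PySem.Set.empty := by
  intro routes
  induction routes with
  | nil => intro s d h; simpa using h.symm
  | cons r rs ih =>
    intro s d h
    simp only [List.foldl_cons]
    apply ih
    rw [getD_foldl_stepG, h]
    have hslice : PySem.List.slice r (some 1) none = r.drop 1 := by
      simp [pysem]
    rw [hslice, ← Binner, ← inner_eq]

-- ===== VERDICT (by name: the statement is the Claim_ definition above) =====
theorem get_adjacent_stations_spec : Claim_equal_get_adjacent_stations := by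
  intro station all_routes _
  unfold Spec_get_adjacent_stations get_adjacent_stations get_adjacent_stations_alt
  exact foldl_routes_eq station all_routes PySem.Set.empty PySem.Dict.empty (by simp)
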